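-- pv_equiv track=rewrite | github.com/zzq2000/Hackathon-24h-Bench | benchmarks/implementations/_validation.py | find_success_marker_line
-- ===== SOURCE A (Python) =====
-- from typing import Iterable, Optional
--
-- def find_success_marker_line(output: str, markers: Iterable[str]) -> Optional[str]:
--     """Return the first output line containing any success marker."""
--     normalized = tuple(str(marker).strip().lower() for marker in markers if str(marker).strip())
--     if not normalized:
--         return None
--
--     for raw_line in (output or "").splitlines():
--         line = raw_line.strip()
--         if not line:
--             continue
--         lowered = line.lower()
--         if any(marker in lowered for marker in normalized):
--             return line
--     return None
-- ===== SOURCE B (Python) =====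
-- def find_success_marker_line(output, markers):
--     """Return the first output line containing any success marker.
--
--     Marker-major scan: for each normalized marker, look for a matching line
--     strictly before the best index found so far; return the line at the
--     smallest matching index.
--     """
--     lines = [raw.strip() for raw in (output or "").splitlines()]
--     lows = [line.lower() for line in lines]
--     best = None
--     for marker in markers:
--         m = str(marker).strip().lower()
--         if not m:
--             continue
--         stop = len(lows) if best is None else best
--         for i in range(stop):
--             if lows[i] and m in lows[i]:
--                 best = i
--                 break
--     return lines[best] if best is not None else None
-- ===== Notes on version B (the rewrite author's own statement) =====
-- stated objective: alternative
-- what changed: Replaces A's line-major scan (for each line, test every marker) by a marker-major scan: for each normalized marker find the index of its first matching line with an early break, keep the minimum index, and return that line.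
import Mathlib
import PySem

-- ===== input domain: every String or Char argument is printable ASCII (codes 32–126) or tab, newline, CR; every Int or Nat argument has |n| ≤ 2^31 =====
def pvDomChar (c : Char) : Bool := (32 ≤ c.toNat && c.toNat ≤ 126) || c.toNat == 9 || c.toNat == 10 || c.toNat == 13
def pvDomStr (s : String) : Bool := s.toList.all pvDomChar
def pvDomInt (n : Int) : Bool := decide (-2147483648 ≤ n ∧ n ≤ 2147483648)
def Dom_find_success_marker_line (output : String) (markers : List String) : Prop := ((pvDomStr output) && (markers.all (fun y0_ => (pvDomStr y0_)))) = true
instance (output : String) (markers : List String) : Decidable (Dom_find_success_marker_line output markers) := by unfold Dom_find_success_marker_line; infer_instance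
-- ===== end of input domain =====

-- B replaces A's line-major scan (first line whose lowering contains any marker) by a
-- marker-major scan (for each marker, the first matching line index; return the line at
-- the minimal index); objective: alternative algorithm, same result.

-- ===== PORT A =====
-- A's per-line loop: strip, skip empty, return the line if any marker is a substring of its lowering
def pvLoopA (normalized : List String) : List String → Option String
  | [] => none
  | raw :: rest =>
    let line := PySem.Str.strip raw
    if line = "" then pvLoopA normalized rest
    else
      let lowered := PySem.Str.lower line
      if normalized.any (fun m => PySem.Str.isIn m lowered) then some line
      else pvLoopA normalized rest

def find_success_marker_line (output : String) (markers : List String) : Option String :=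
  let normalized := (markers.map (fun m => PySem.Str.lower (PySem.Str.strip m))).filter (fun m => m ≠ "")
  if normalized = [] then none
  else pvLoopA normalized (PySem.Str.splitlines output)  -- (output or "") = output for strings

-- ===== PORT B =====
-- B's inner loop: first index i (from start i0) whose (lowered) line is non-empty and contains m
def pvFirstIdx (m : String) : List String → Nat → Option Nat
  | [], _ => none
  | low :: rest, i =>
    if low ≠ "" ∧ PySem.Str.isIn m low then some i
    else pvFirstIdx m rest (i + 1)

-- B's outer loop over the raw markers: scan only lines strictly before the current best
def pvBest (lows : List String) : Option Nat → List String → Option Nat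
  | best, [] => best
  | best, marker :: rest =>
    let m := PySem.Str.lower (PySem.Str.strip marker)
    if m = "" then pvBest lows best rest
    else
      let stop := match best with | none => lows.length | some b => b
      match pvFirstIdx m (lows.take stop) 0 with
      | none => pvBest lows best rest
      | some i => pvBest lows (some i) rest

def find_success_marker_line_alt (output : String) (markers : List String) : Option String :=
  let lines := (PySem.Str.splitlines output).map PySem.Str.strip
  let lows := lines.map PySem.Str.lower
  match pvBest lows none markers with
  | none => none
  | some i => lines[i]?

-- ===== PRECONDITION & SPEC =====
def Spec_find_success_marker_line (output : String) (markers : List String) (out : Option String) : Prop := out = find_success_marker_line_alt output markers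
instance (output : String) (markers : List String) (out : Option String) : Decidable (Spec_find_success_marker_line output markers out) := by unfold Spec_find_success_marker_line; infer_instance

-- ===== CLAIM (what is proved, stated in full; the proofs are below) =====
def Claim_equal_find_success_marker_line : Prop := ∀ (output : String) (markers : List String), Dom_find_success_marker_line output markers → Spec_find_success_marker_line output markers (find_success_marker_line output markers)

-- ===== LEMMAS AND PROOFS =====

-- the per-line predicate both sides test, on the stripped (not yet lowered) line
def pvP (N : List String) (l : String) : Bool :=
  (l != "") && N.any (fun m => PySem.Str.isIn m (PySem.Str.lower l))

def pvQ (m : String) (l : String) : Bool :=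
  (l != "") && PySem.Str.isIn m (PySem.Str.lower l)

-- B's inner-loop test, on the lowered line
def pvQlow (m : String) (low : String) : Bool :=
  (low != "") && PySem.Str.isIn m low

-- symmetric min on Option Nat
def pvOMin : Option Nat → Option Nat → Option Nat
  | none, y => y
  | x, none => x
  | some i, some j => some (min i j)

theorem pvOMin_none_right (x : Option Nat) : pvOMin x none = x := by cases x <;> rfl

theorem pvLower_eq_empty_iff (sS : String) : PySem.Str.lower sS = "" ↔ sS = "" := by
  constructor
  · intro h
    have h2 : (PySem.Str.lower sS).toList = ([] : List Char) := by rw [h]; rfl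
    rw [PySem.Str.toList_lower] at h2
    have h3 : sS.toList = ([] : List Char) := by
      cases hc : sS.toList with
      | nil => rfl
      | cons c cs => rw [hc] at h2; simp [PySem.Chars.lower] at h2
    exact String.toList_eq_nil_iff.mp h3
  · intro h
    rw [h]
    rfl

-- A's loop is find? of pvP over the stripped lines
theorem pvLoopA_eq_find? (N : List String) (raws : List String) :
    pvLoopA N raws = (raws.map PySem.Str.strip).find? (pvP N) := by
  induction raws with
  | nil => rfl
  | cons raw rest ih =>
    simp only [pvLoopA, List.map_cons]
    by_cases h : PySem.Str.strip raw = ""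
    · rw [if_pos h, List.find?_cons_of_neg (by simp [pvP, h]), ih]
    · rw [if_neg h]
      by_cases h2 : (N.any fun m => PySem.Str.isIn m (PySem.Str.lower (PySem.Str.strip raw))) = true
      · rw [if_pos h2, List.find?_cons_of_pos (by simp only [pvP]; rw [h2]; simp [h])]
      · rw [if_neg h2, List.find?_cons_of_neg (by simp only [pvP]; simp [h]; simpa using h2), ih]

-- B's inner loop is findIdx? of pvQlow, shifted by the start index
theorem pvFirstIdx_eq_findIdx? (m : String) (L : List String) (i : Nat) :
    pvFirstIdx m L i = (L.findIdx? (pvQlow m)).map (· + i) := by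
  induction L generalizing i with
  | nil => rfl
  | cons l rest ih =>
    simp only [pvFirstIdx, List.findIdx?_cons]
    by_cases h : l ≠ "" ∧ PySem.Str.isIn m l = true
    · have hq : pvQlow m l = true := by
        simp only [pvQlow, Bool.and_eq_true]
        exact ⟨by simp [h.1], h.2⟩
      rw [if_pos h, hq]
      simp
    · have hq : pvQlow m l = false := by
        by_cases h1 : l = "" <;> simp_all [pvQlow]
      rw [if_neg h, hq, ih]
      cases hr : rest.findIdx? (pvQlow m) with
      | none => simp
      | some a => simp; omega

-- B's inner loop over the lowered lines computes findIdx? of pvQ over the original lines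
theorem pvFirstIdx_map_lower (m : String) (L : List String) :
    pvFirstIdx m (L.map PySem.Str.lower) 0 = L.findIdx? (pvQ m) := by
  rw [pvFirstIdx_eq_findIdx?, List.findIdx?_map]
  have hcongr : (pvQlow m ∘ PySem.Str.lower) = pvQ m := by
    funext l
    show pvQlow m (PySem.Str.lower l) = pvQ m l
    by_cases h : l = ""
    · subst h
      have hl : PySem.Str.lower "" = "" := (pvLower_eq_empty_iff "").mpr rfl
      simp [pvQlow, pvQ, hl]
    · have hl : PySem.Str.lower l ≠ "" := fun hl => h ((pvLower_eq_empty_iff l).mp hl)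
      have h1 : (PySem.Str.lower l != "") = true := by simp [hl]
      have h2 : (l != "") = true := by simp [h]
      simp only [pvQlow, pvQ, h1, h2]
  rw [hcongr]
  cases h : L.findIdx? (pvQ m) <;> simp

-- findIdx? over a take is findIdx? filtered below the cut
theorem findIdx?_take (p : String → Bool) (L : List String) (k : Nat) :
    (L.take k).findIdx? p = (L.findIdx? p).bind (fun i => if i < k then some i else none) := by
  induction L generalizing k with
  | nil => simp
  | cons l rest ih =>
    cases k with
    | zero =>
      simp only [List.take_zero, List.findIdx?_nil, List.findIdx?_cons]
      by_cases h : p l = true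
      · simp [h]
      · simp only [h]
        cases hr : rest.findIdx? p <;> simp
    | succ k' =>
      simp only [List.take_succ_cons, List.findIdx?_cons]
      by_cases h : p l = true
      · simp [h]
      · simp only [h, ih]
        cases hr : rest.findIdx? p with
        | none => simp
        | some i =>
          simp only [Option.bind_some, Option.map_some]
          by_cases hik : i < k' <;> simp [hik]

-- findIdx? of a pointwise disjunction is the pvOMin of the two findIdx?s
theorem findIdx?_or_eq_oMin (p q : String → Bool) (L : List String) :
    L.findIdx? (fun l => p l || q l) = pvOMin (L.findIdx? p) (L.findIdx? q) := by
  induction L with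
  | nil => rfl
  | cons l rest ih =>
    simp only [List.findIdx?_cons]
    by_cases hp : p l = true
    · by_cases hq : q l = true
      · simp [hp, hq, pvOMin]
      · simp only [hp, hq, Bool.true_or, if_true]
        cases h : rest.findIdx? q <;> simp [pvOMin]
    · by_cases hq : q l = true
      · simp only [hp, hq, Bool.false_or, if_true]
        cases h : rest.findIdx? p <;> simp [pvOMin]
      · simp only [hp, hq, Bool.false_or, ih]
        cases h1 : rest.findIdx? p <;> cases h2 : rest.findIdx? q <;>
          simp [pvOMin, Nat.min_def]
        split_ifs <;> rfl

-- with no markers, no line matches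
theorem findIdx?_pvP_nil (L : List String) : L.findIdx? (pvP []) = none := by
  rw [List.findIdx?_eq_none_iff]
  intro x _
  simp [pvP]

-- the outer loop computes pvOMin of the accumulator and findIdx? of pvP over the normalized markers
theorem pvBest_eq (L : List String) (N : List String) (b : Option Nat) :
    pvBest (L.map PySem.Str.lower) b N =
      pvOMin b (L.findIdx? (pvP ((N.map (fun m => PySem.Str.lower (PySem.Str.strip m))).filter (fun m => m ≠ "")))) := by
  induction N generalizing b with
  | nil =>
    simp only [List.map_nil, List.filter_nil]
    rw [findIdx?_pvP_nil, pvOMin_none_right]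
    rfl
  | cons mk rest ih =>
    simp only [pvBest, List.map_cons, List.filter_cons]
    by_cases h : PySem.Str.lower (PySem.Str.strip mk) = ""
    · rw [if_pos h, if_neg (by simp [h]), ih]
    · rw [if_neg h, if_pos (by simp [h])]
      have hsplit : L.findIdx? (pvP (PySem.Str.lower (PySem.Str.strip mk) ::
          (rest.map (fun m => PySem.Str.lower (PySem.Str.strip m))).filter (fun m => decide (m ≠ "")))) =
          pvOMin (L.findIdx? (pvQ (PySem.Str.lower (PySem.Str.strip mk))))
                 (L.findIdx? (pvP ((rest.map (fun m => PySem.Str.lower (PySem.Str.strip m))).filter (fun m => decide (m ≠ ""))))) := by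
        rw [← findIdx?_or_eq_oMin]
        congr 1
        funext l
        simp [pvP, pvQ, Bool.and_or_distrib_left]
      rw [hsplit]
      cases b with
      | none =>
        have hstop : ((L.map PySem.Str.lower).take (L.map PySem.Str.lower).length) = L.map PySem.Str.lower :=
          List.take_length
        rw [hstop, pvFirstIdx_map_lower]
        cases hidx : L.findIdx? (pvQ (PySem.Str.lower (PySem.Str.strip mk))) with
        | none =>
          show pvBest (L.map PySem.Str.lower) none rest = _
          rw [ih]
          rfl
        | some i =>
          show pvBest (L.map PySem.Str.lower) (some i) rest = _
          rw [ih]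
          rfl
      | some k =>
        have htake : (L.map PySem.Str.lower).take k = (L.take k).map PySem.Str.lower :=
          (List.map_take ..).symm
        rw [htake, pvFirstIdx_map_lower, findIdx?_take]
        cases hidx : L.findIdx? (pvQ (PySem.Str.lower (PySem.Str.strip mk))) with
        | none =>
          show pvBest (L.map PySem.Str.lower) (some k) rest = _
          rw [ih]
          rfl
        | some i =>
          simp only [Option.bind_some]
          by_cases hik : i < k
          · rw [if_pos hik]
            show pvBest (L.map PySem.Str.lower) (some i) rest = _
            rw [ih]
            cases hX : L.findIdx? (pvP ((rest.map (fun m => PySem.Str.lower (PySem.Str.strip m))).filter (fun m => decide (m ≠ "")))) <;>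
              simp [pvOMin] <;> omega
          · rw [if_neg hik]
            show pvBest (L.map PySem.Str.lower) (some k) rest = _
            rw [ih]
            cases hX : L.findIdx? (pvP ((rest.map (fun m => PySem.Str.lower (PySem.Str.strip m))).filter (fun m => decide (m ≠ "")))) <;>
              simp [pvOMin] <;> omega

-- find? equals findIdx? followed by lookup
theorem find?_eq_findIdx?_bind (p : String → Bool) (L : List String) :
    L.find? p = (L.findIdx? p).bind (fun i => L[i]?) := by
  induction L with
  | nil => rfl
  | cons l rest ih =>
    simp only [List.findIdx?_cons]
    by_cases h : p l = true
    · rw [List.find?_cons_of_pos h, if_pos h]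
      rfl
    · rw [List.find?_cons_of_neg h, if_neg h, ih]
      cases hr : rest.findIdx? p <;> simp

-- ===== VERDICT (by name: the statement is the Claim_ definition above) =====
theorem find_success_marker_line_spec : Claim_equal_find_success_marker_line := by
  intro output markers _
  show find_success_marker_line output markers = find_success_marker_line_alt output markers
  simp only [find_success_marker_line, find_success_marker_line_alt]
  rw [pvBest_eq]
  by_cases hempty :
      (markers.map (fun m => PySem.Str.lower (PySem.Str.strip m))).filter (fun m => m ≠ "") = []
  · rw [hempty, if_pos rfl, findIdx?_pvP_nil]
    rfl
  · rw [if_neg hempty, pvLoopA_eq_find?, find?_eq_findIdx?_bind]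
    cases h : ((PySem.Str.splitlines output).map PySem.Str.strip).findIdx?
        (pvP ((markers.map (fun m => PySem.Str.lower (PySem.Str.strip m))).filter (fun m => m ≠ ""))) <;>
      simp [pvOMin]
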